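-- pv_equiv track=rewrite | github.com/b0r3k/dial-dial | fuzzy_ne/ne_matcher.py | split_input_starts_ends
-- ===== SOURCE A (Python) =====
-- from typing import Tuple
--
-- def split_input_starts_ends(input: str) -> Tuple[list, dict, dict]:
--     """
--         Splits the input strings on spaces, remembering the mapping from indices to words which start/end there.
--
--
--         Parameters:
--         input (str): Some string, usually a sentence.
--
--
--         Returns:
--         words (list): List of words found in the input.
--
--         starts (dict): Dictionary starts[idx] = Index to the list words to the word starting at idx
--
--         ends (dict): Dictionary ends[idx] = Index to the list words to the word ending at idx
--     """
--     words, starts, ends = [], {}, {}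
--     word = []
--     for index, char in enumerate(input):
--         if char == ' ':
--             words.append(''.join(word))
--             word = []
--             ends[index] = len(words) - 1
--         elif not word:
--             word.append(char)
--             starts[index] = len(words)
--         else:
--             word.append(char)
--     words.append(''.join(word))
--     ends[len(input)] = len(words) - 1
--
--     return words, starts, ends
-- ===== SOURCE B (Python) =====
-- def split_input_starts_ends(input: str):
--     words = input.split(' ')
--     starts, ends = {}, {}
--     pos = 0
--     for i, w in enumerate(words):
--         if w:
--             starts[pos] = i
--         pos += len(w)
--         ends[pos] = i
--         pos += 1
--     return words, starts, ends
-- ===== Notes on version B (the rewrite author's own statement) =====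
-- stated objective: simpler
-- what changed: B replaces A's single character-by-character scan with explicit word-buffer and dict bookkeeping by a tokenize step (str.split on a single space) followed by a pass over the words that tracks a running character position to fill starts/ends.
import Mathlib
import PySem

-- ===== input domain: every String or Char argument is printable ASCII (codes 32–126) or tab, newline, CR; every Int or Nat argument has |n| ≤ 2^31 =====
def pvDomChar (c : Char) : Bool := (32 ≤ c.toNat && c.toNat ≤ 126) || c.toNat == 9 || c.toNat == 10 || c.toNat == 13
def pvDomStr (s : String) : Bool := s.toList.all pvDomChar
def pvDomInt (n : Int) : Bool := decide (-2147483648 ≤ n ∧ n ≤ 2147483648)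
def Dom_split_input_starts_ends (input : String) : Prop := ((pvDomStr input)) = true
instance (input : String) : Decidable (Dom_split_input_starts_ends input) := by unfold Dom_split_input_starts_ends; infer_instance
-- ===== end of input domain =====

-- B replaces A's single char-scan (word buffer + dict bookkeeping in one loop) by a tokenize
-- step (str.split on a single space) followed by a position-tracking pass over the words; return
-- values are proved equal on every input.

-- ===== PORT A =====
-- one step of A's `for index, char in enumerate(input)` loop; state = (words, starts, ends, word)
def pvStepA (st : List String × PySem.Dict Int Int × PySem.Dict Int Int × List Char)
    (ic : Int × Char) : List String × PySem.Dict Int Int × PySem.Dict Int Int × List Char :=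
  if ic.2 = ' ' then
    (st.1 ++ [String.ofList st.2.2.2], st.2.1,
      st.2.2.1.insert ic.1 (((st.1 ++ [String.ofList st.2.2.2]).length : Int) - 1), [])
  else if st.2.2.2 = [] then
    (st.1, st.2.1.insert ic.1 (st.1.length : Int), st.2.2.1, st.2.2.2 ++ [ic.2])
  else
    (st.1, st.2.1, st.2.2.1, st.2.2.2 ++ [ic.2])

def split_input_starts_ends (input : String) :
    List String × (List (Int × Int)) × (List (Int × Int)) :=
  let r := (PySem.List.enumerate input.toList).foldl pvStepA
    ([], PySem.Dict.empty, PySem.Dict.empty, [])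
  let words := r.1 ++ [String.ofList r.2.2.2]
  (words, r.2.1.items,
    (r.2.2.1.insert ((PySem.Str.len input : Int)) ((words.length : Int) - 1)).items)

-- ===== PORT B =====
-- one step of B's `for i, w in enumerate(words)` loop; state = (starts, ends, pos)
def pvStepB (st : PySem.Dict Int Int × PySem.Dict Int Int × Int)
    (iw : Int × String) : PySem.Dict Int Int × PySem.Dict Int Int × Int :=
  let starts := if iw.2 ≠ "" then st.1.insert st.2.2 iw.1 else st.1
  let p := st.2.2 + (PySem.Str.len iw.2 : Int)
  (starts, st.2.1.insert p iw.1, p + 1)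

def split_input_starts_ends_alt (input : String) :
    List String × (List (Int × Int)) × (List (Int × Int)) :=
  let words := (PySem.Chars.splitOn input.toList [' ']).map String.ofList
  let r := (PySem.List.enumerate words).foldl pvStepB
    (PySem.Dict.empty, PySem.Dict.empty, 0)
  (words, r.1.items, r.2.1.items)

-- ===== PRECONDITION & SPEC =====
def Spec_split_input_starts_ends (input : String)
    (out : List String × (List (Int × Int)) × (List (Int × Int))) : Prop :=
  out = split_input_starts_ends_alt input
instance (input : String) (out : List String × (List (Int × Int)) × (List (Int × Int))) :
    Decidable (Spec_split_input_starts_ends input out) := by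
  unfold Spec_split_input_starts_ends; infer_instance

-- ===== CLAIM =====
def Claim_equal_split_input_starts_ends : Prop :=
  ∀ (input : String), Dom_split_input_starts_ends input →
    Spec_split_input_starts_ends input (split_input_starts_ends input)

-- ===== LEMMAS AND PROOFS =====

-- structural split-on-space (proved equal to PySem.Chars.splitOn · [' '])
def pvWsplit : List Char → List (List Char)
  | [] => [[]]
  | c :: t =>
      if c = ' ' then [] :: pvWsplit t
      else (c :: (pvWsplit t).headI) :: (pvWsplit t).tail

lemma pvWsplit_ne_nil (cs : List Char) : pvWsplit cs ≠ [] := by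
  cases cs with
  | nil => simp [pvWsplit]
  | cons c t => simp only [pvWsplit]; split <;> simp

lemma pvWsplit_cons_headI_tail (cs : List Char) :
    (pvWsplit cs).headI :: (pvWsplit cs).tail = pvWsplit cs := by
  cases h : pvWsplit cs with
  | nil => exact absurd h (pvWsplit_ne_nil cs)
  | cons a t => simp

lemma pv_go_eq (fuel : Nat) : ∀ (l cur : List Char) (acc : List (List Char)),
    l.length ≤ fuel →
    PySem.Chars.splitOn.go [' '] fuel l cur acc
      = acc.reverse ++ (cur.reverse ++ (pvWsplit l).headI) :: (pvWsplit l).tail := by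
  induction fuel with
  | zero =>
      intro l cur acc h
      have : l = [] := by simpa using List.length_eq_zero_iff.mp (Nat.le_zero.mp h)
      subst this
      simp [PySem.Chars.splitOn.go, pvWsplit]
  | succ n ih =>
      intro l cur acc h
      cases l with
      | nil => simp [PySem.Chars.splitOn.go, pvWsplit]
      | cons c rest =>
          by_cases hc : c = ' '
          · subst hc
            simp only [PySem.Chars.splitOn.go, List.isPrefixOf, BEq.rfl, Bool.true_and,
              if_true, List.length_cons, List.length_nil, List.drop_succ_cons, List.drop_zero]
            rw [ih rest [] (cur.reverse :: acc) (by simpa using Nat.le_of_succ_le_succ h)]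
            simp [pvWsplit, pvWsplit_cons_headI_tail]
          · have hpre : [' '].isPrefixOf (c :: rest) = false := by
              simp [List.isPrefixOf]
              intro hh; exact absurd hh.symm hc
            simp only [PySem.Chars.splitOn.go, hpre, Bool.false_eq_true, if_false]
            rw [ih rest (c :: cur) acc (by simpa using Nat.le_of_succ_le_succ h)]
            simp [pvWsplit, hc]

lemma pv_splitOn_eq_wsplit (cs : List Char) :
    PySem.Chars.splitOn cs [' '] = pvWsplit cs := by
  show PySem.Chars.splitOn.go [' '] (cs.length + 1) cs [] [] = _
  rw [pv_go_eq (cs.length + 1) cs [] [] (Nat.le_succ _)]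
  simpa using pvWsplit_cons_headI_tail cs

lemma pv_headI_mem {α : Type} (l : List α) [Inhabited α] (h : l ≠ []) : l.headI ∈ l := by
  cases l with
  | nil => exact absurd rfl h
  | cons a t => simp

lemma pvWsplit_no_space (cs : List Char) :
    ∀ w ∈ pvWsplit cs, ∀ c ∈ w, ¬ c = ' ' := by
  induction cs with
  | nil => simp [pvWsplit]
  | cons c t ih =>
      intro w hw d hd
      by_cases hc : c = ' '
      · rw [hc] at hw
        simp only [pvWsplit, if_pos rfl] at hw
        rcases List.mem_cons.mp hw with h | h
        · subst h; simp at hd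
        · exact ih w h d hd
      · simp only [pvWsplit, if_neg hc] at hw
        rcases List.mem_cons.mp hw with h | h
        · subst h
          rcases List.mem_cons.mp hd with h2 | h2
          · subst h2; exact hc
          · exact ih _ (pv_headI_mem _ (pvWsplit_ne_nil t)) d h2
        · exact ih w (List.mem_of_mem_tail h) d hd

-- joining the split reproduces the characters
def pvWjoin : List (List Char) → List Char
  | [] => []
  | [w] => w
  | w :: t => w ++ ' ' :: pvWjoin t

lemma pvWjoin_cons_cons (w a : List Char) (t : List (List Char)) :
    pvWjoin (w :: a :: t) = w ++ ' ' :: pvWjoin (a :: t) := rfl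

lemma pvWjoin_wsplit (cs : List Char) : pvWjoin (pvWsplit cs) = cs := by
  induction cs with
  | nil => simp [pvWsplit, pvWjoin]
  | cons c t ih =>
      by_cases hc : c = ' '
      · subst hc
        rw [show pvWsplit (' ' :: t) = [] :: pvWsplit t from by simp [pvWsplit]]
        cases h : pvWsplit t with
        | nil => exact absurd h (pvWsplit_ne_nil t)
        | cons a s =>
            rw [h] at ih
            rw [pvWjoin_cons_cons, ih]
            simp
      · simp only [pvWsplit, if_neg hc]
        cases h : pvWsplit t with
        | nil => exact absurd h (pvWsplit_ne_nil t)
        | cons a s =>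
            rw [h] at ih
            simp only [h, List.headI_cons, List.tail_cons]
            cases s with
            | nil => simpa [pvWjoin] using ih
            | cons b u =>
                rw [pvWjoin_cons_cons] at ih ⊢
                simp [ih]

-- A's loop over one space-free word
lemma pv_foldA_word (w : List Char) (hw : ∀ c ∈ w, ¬ c = ' ') :
    ∀ (pos : Int) (ws : List String) (starts ends : PySem.Dict Int Int) (cur : List Char),
    List.foldl pvStepA (ws, starts, ends, cur) (PySem.List.enumerate w pos)
      = (ws, if cur = [] ∧ w ≠ [] then starts.insert pos (ws.length : Int) else starts,
          ends, cur ++ w) := by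
  induction w with
  | nil => intro pos ws starts ends cur; simp [PySem.List.enumerate_nil]
  | cons c t ih =>
      intro pos ws starts ends cur
      have hc : ¬ c = ' ' := hw c (by simp)
      have ht : ∀ d ∈ t, ¬ d = ' ' := fun d hd => hw d (by simp [hd])
      rw [PySem.List.enumerate_cons, List.foldl_cons]
      by_cases hcur : cur = []
      · subst hcur
        rw [show pvStepA (ws, starts, ends, []) (pos, c)
              = (ws, starts.insert pos (ws.length : Int), ends, [c]) from by
            simp [pvStepA, hc]]
        rw [ih ht (pos + 1) ws (starts.insert pos (ws.length : Int)) ends [c]]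
        simp
      · rw [show pvStepA (ws, starts, ends, cur) (pos, c)
              = (ws, starts, ends, cur ++ [c]) from by
            simp [pvStepA, hc, hcur]]
        rw [ih ht (pos + 1) ws starts ends (cur ++ [c])]
        simp [hcur]

-- casting helpers
lemma pv_ofList_ne_empty_iff (w : List Char) : (String.ofList w ≠ "") ↔ w ≠ [] := by
  constructor
  · intro h h2; exact h (by simp [h2])
  · intro h h2; exact h (by simpa using congrArg String.toList h2)

lemma pv_len_ofList (w : List Char) : (PySem.Str.len (String.ofList w) : Int) = (w.length : Int) := by
  simp [PySem.Str.len]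

-- the main correspondence between A's char loop (plus its epilogue) and B's word loop
lemma pv_main (l : List (List Char)) (hne : l ≠ [])
    (hl : ∀ w ∈ l, ∀ c ∈ w, ¬ c = ' ') :
    ∀ (pos : Int) (ws : List String) (starts ends : PySem.Dict Int Int),
    ((List.foldl pvStepA (ws, starts, ends, ([] : List Char))
          (PySem.List.enumerate (pvWjoin l) pos)).1
       ++ [String.ofList (List.foldl pvStepA (ws, starts, ends, ([] : List Char))
          (PySem.List.enumerate (pvWjoin l) pos)).2.2.2],
     (List.foldl pvStepA (ws, starts, ends, ([] : List Char))
          (PySem.List.enumerate (pvWjoin l) pos)).2.1,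
     (List.foldl pvStepA (ws, starts, ends, ([] : List Char))
          (PySem.List.enumerate (pvWjoin l) pos)).2.2.1.insert
        (pos + ((pvWjoin l).length : Int)) ((ws.length : Int) + (l.length : Int) - 1))
    = (ws ++ l.map String.ofList,
       (List.foldl pvStepB (starts, ends, pos)
          (PySem.List.enumerate (l.map String.ofList) (ws.length : Int))).1,
       (List.foldl pvStepB (starts, ends, pos)
          (PySem.List.enumerate (l.map String.ofList) (ws.length : Int))).2.1) := by
  induction l with
  | nil => exact absurd rfl hne
  | cons w t ih =>
      intro pos ws starts ends
      have hw : ∀ c ∈ w, ¬ c = ' ' := hl w (by simp)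
      have ht : ∀ v ∈ t, ∀ c ∈ v, ¬ c = ' ' := fun v hv => hl v (by simp [hv])
      cases t with
      | nil =>
          simp only [pvWjoin]
          rw [pv_foldA_word w hw pos ws starts ends []]
          simp only [List.map_cons, List.map_nil, PySem.List.enumerate_cons,
            PySem.List.enumerate_nil, List.foldl_cons, List.foldl_nil, pvStepB]
          by_cases hwnil : w = []
          · subst hwnil
            simp [pv_ofList_ne_empty_iff, pv_len_ofList, pvWjoin]
          · simp only [if_pos (And.intro rfl hwnil), if_pos ((pv_ofList_ne_empty_iff w).mpr hwnil),
              pv_len_ofList]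
            have h1 : (ws.length : Int) + (((0 : Nat) + 1 : Nat) : Int) - 1 = (ws.length : Int) := by
              push_cast; ring
            simp only [List.nil_append, List.length_cons, List.length_nil, h1]
            simp
            exact fun h2 => absurd h2 hwnil
      | cons a s =>
          rw [pvWjoin_cons_cons]
          rw [show (w ++ ' ' :: pvWjoin (a :: s)) = (w ++ [' ']) ++ pvWjoin (a :: s) from by simp]
          rw [PySem.List.enumerate_append, List.foldl_append,
              PySem.List.enumerate_append, List.foldl_append,
              PySem.List.enumerate_cons, PySem.List.enumerate_nil]
          rw [pv_foldA_word w hw pos ws starts ends []]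
          simp only [List.foldl_cons, List.foldl_nil, List.nil_append, eq_self_iff_true, true_and]
          rw [show pvStepA (ws, (if w ≠ [] then starts.insert pos (ws.length : Int) else starts),
                ends, w) (pos + (w.length : Int), ' ')
              = (ws ++ [String.ofList w],
                 (if w ≠ [] then starts.insert pos (ws.length : Int) else starts),
                 ends.insert (pos + (w.length : Int)) (((ws ++ [String.ofList w]).length : Int) - 1),
                 ([] : List Char)) from by simp [pvStepA]]
          have hkey : pos + ((w ++ [' '] ++ pvWjoin (a :: s)).length : Int)
              = (pos + ((w ++ [' ']).length : Int)) + ((pvWjoin (a :: s)).length : Int) := by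
            push_cast [List.length_append]; ring
          have hval : (ws.length : Int) + ((w :: a :: s).length : Int) - 1
              = (((ws ++ [String.ofList w]).length : Int)) + (((a :: s).length : Nat) : Int) - 1 := by
            push_cast [List.length_append, List.length_cons, List.length_nil]; ring
          rw [hkey, hval]
          rw [ih (by simp) ht (pos + ((w ++ [' ']).length : Int)) (ws ++ [String.ofList w])
              (if w ≠ [] then starts.insert pos (ws.length : Int) else starts)
              (ends.insert (pos + (w.length : Int)) (((ws ++ [String.ofList w]).length : Int) - 1))]
          simp only [List.map_cons, PySem.List.enumerate_cons, List.foldl_cons, pvStepB,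
            pv_len_ofList, pv_ofList_ne_empty_iff, List.length_append, List.length_cons,
            List.length_nil, List.append_assoc, List.singleton_append, Nat.cast_add,
            Nat.cast_one, Nat.cast_zero, add_sub_cancel_right, add_assoc, zero_add, add_zero]
          try ring_nf

-- ===== VERDICT (by name: the statement is the Claim_ definition above) =====
theorem split_input_starts_ends_spec : Claim_equal_split_input_starts_ends := by
  intro input _
  show split_input_starts_ends input = split_input_starts_ends_alt input
  simp only [split_input_starts_ends, split_input_starts_ends_alt, pv_splitOn_eq_wsplit]
  have hmain := pv_main (pvWsplit input.toList) (pvWsplit_ne_nil input.toList)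
      (pvWsplit_no_space input.toList) 0 [] PySem.Dict.empty PySem.Dict.empty
  rw [pvWjoin_wsplit] at hmain
  simp only [List.length_nil, Nat.cast_zero, zero_add, List.nil_append] at hmain
  have e1 := congrArg (fun p : List String × PySem.Dict Int Int × PySem.Dict Int Int => p.1) hmain
  have e2 := congrArg (fun p : List String × PySem.Dict Int Int × PySem.Dict Int Int => p.2.1) hmain
  have e3 := congrArg (fun p : List String × PySem.Dict Int Int × PySem.Dict Int Int => p.2.2) hmain
  simp only at e1 e2 e3
  have hkey : ((PySem.Str.len input : Int)) = ((input.toList.length : Nat) : Int) := by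
    simp [PySem.Str.len]
  simp only [Prod.mk.injEq]
  refine ⟨e1, by rw [e2], ?_⟩
  rw [hkey, e1, List.length_map, e3]
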